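-- pv_equiv track=rewrite | github.com/Syntopia/FragmentariumWeb | scripts/beautify_fragments.py | line_brace_stats
-- ===== SOURCE A (Python) =====
-- def strip_comments_for_braces(line: str, in_block_comment: bool) -> tuple[str, bool]:
--     out: list[str] = []
--     i = 0
--     n = len(line)
--     in_string: str | None = None
--     escape = False
--
--     while i < n:
--         ch = line[i]
--         nxt = line[i + 1] if i + 1 < n else ""
--
--         if in_block_comment:
--             if ch == "*" and nxt == "/":
--                 in_block_comment = False
--                 i += 2
--                 continue
--             i += 1
--             continue
--
--         if in_string is not None:
--             out.append(ch)
--             if escape: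
--                 escape = False
--             elif ch == "\\":
--                 escape = True
--             elif ch == in_string:
--                 in_string = None
--             i += 1
--             continue
--
--         if ch in ("'", '"'):
--             in_string = ch
--             out.append(ch)
--             i += 1
--             continue
--
--         if ch == "/" and nxt == "/":
--             break
--         if ch == "/" and nxt == "*":
--             in_block_comment = True
--             i += 2
--             continue
--
--         out.append(ch)
--         i += 1
--
--     return "".join(out), in_block_comment
--
-- def line_brace_stats(line: str, in_block_comment: bool) -> tuple[int, int, bool]:
--     code, next_in_block_comment = strip_comments_for_braces(line, in_block_comment)
--     stripped = code.lstrip()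
--     leading_close = 0
--     for ch in stripped:
--         if ch == "}":
--             leading_close += 1
--             continue
--         break
--     delta = code.count("{") - code.count("}")
--     return delta, leading_close, next_in_block_comment
-- ===== SOURCE B (Python) =====
-- def line_brace_stats(line: str, in_block_comment: bool) -> tuple[int, int, bool]:
--     # Single pass: maintain brace delta and leading-close count directly,
--     # without building the stripped code string.
--     delta = 0
--     leading_close = 0
--     lead_done = False
--     in_string = None
--     escape = False
--     i = 0
--     n = len(line)
--     while i < n:
--         ch = line[i]
--         nxt = line[i + 1] if i + 1 < n else ""
--
--         if in_block_comment:
--             if ch == "*" and nxt == "/":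
--                 in_block_comment = False
--                 i += 2
--             else:
--                 i += 1
--             continue
--
--         if in_string is None:
--             if ch == "/" and nxt == "/":
--                 break
--             if ch == "/" and nxt == "*":
--                 in_block_comment = True
--                 i += 2
--                 continue
--
--         # ch is emitted as code
--         if ch == "{":
--             delta += 1
--         elif ch == "}":
--             delta -= 1
--
--         if not lead_done:
--             if ch == "}":
--                 leading_close += 1
--             elif ch in " \t\n\r\v\f" and leading_close == 0:
--                 pass
--             else:
--                 lead_done = True
--
--         if in_string is not None:
--             if escape:
--                 escape = False
--             elif ch == "\\":
--                 escape = True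
--             elif ch == in_string:
--                 in_string = None
--         elif ch in ("'", '"'):
--             in_string = ch
--         i += 1
--
--     return delta, leading_close, in_block_comment
-- ===== Notes on version B (the rewrite author's own statement) =====
-- stated objective: alternative
-- what changed: Inlined the comment-stripping helper: instead of building an intermediate code string and then counting braces and leading closes over it in separate passes, B makes a single pass over the line, maintaining the brace delta and the leading-close counter (with a done flag) directly in the same comment/string state machine.
import Mathlib
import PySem

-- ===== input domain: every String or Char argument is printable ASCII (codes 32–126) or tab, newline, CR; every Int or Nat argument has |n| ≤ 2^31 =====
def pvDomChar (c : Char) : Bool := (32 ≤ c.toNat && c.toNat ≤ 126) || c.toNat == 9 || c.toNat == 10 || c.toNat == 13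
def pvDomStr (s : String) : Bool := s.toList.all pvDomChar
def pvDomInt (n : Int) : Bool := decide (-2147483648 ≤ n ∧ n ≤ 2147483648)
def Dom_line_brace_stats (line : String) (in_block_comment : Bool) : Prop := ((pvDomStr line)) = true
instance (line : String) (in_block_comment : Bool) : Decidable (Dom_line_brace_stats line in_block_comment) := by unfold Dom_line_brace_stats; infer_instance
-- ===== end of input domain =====

-- B is a single-pass rewrite maintaining the counters directly instead of building the
-- intermediate comment-stripped string; equal return value, no speed claim.

-- Python's str.lstrip() whitespace, restricted to ASCII (exact on Dom)
def pyWs (c : Char) : Bool :=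
  c.toNat = 32 || c.toNat = 9 || c.toNat = 10 || c.toNat = 13 || c.toNat = 11 || c.toNat = 12

-- ===== PORT A =====
-- helper strip_comments_for_braces, transliterated over List Char
def stripA (cs : List Char) (bc : Bool) (ins : Option Char) (esc : Bool) : List Char × Bool :=
  match cs with
  | [] => ([], bc)
  | ch :: rest =>
    let nxt : Option Char := rest.head?
    if bc then
      if ch = '*' ∧ nxt = some '/' then stripA rest.tail false ins esc
      else stripA rest bc ins esc
    else
      match ins with
      | some q =>
        let r := stripA rest bc
          (if esc then some q else if ch = '\\' then some q else if ch = q then none else some q)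
          (if esc then false else ch = '\\')
        (ch :: r.1, r.2)
      | none =>
        if ch = '\'' ∨ ch = '"' then
          let r := stripA rest bc (some ch) esc
          (ch :: r.1, r.2)
        else if ch = '/' ∧ nxt = some '/' then ([], bc)
        else if ch = '/' ∧ nxt = some '*' then stripA rest.tail true ins esc
        else
          let r := stripA rest bc ins esc
          (ch :: r.1, r.2)
  termination_by cs.length
  decreasing_by all_goals (simp [List.length_tail]; try omega)

def line_brace_stats (line : String) (in_block_comment : Bool) : Int × Int × Bool :=
  let r := stripA line.toList in_block_comment none false
  let code := r.1
  let stripped := code.dropWhile pyWs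
  let leading_close : Int := (stripped.takeWhile (· == '}')).length
  let delta : Int := (code.count '{' : Int) - (code.count '}' : Int)
  (delta, leading_close, r.2)

-- ===== PORT B =====
-- single pass over the characters, maintaining delta / leading_close / done directly
def altLoop (cs : List Char) (bc : Bool) (ins : Option Char) (esc : Bool)
    (delta : Int) (lead : Int) (dn : Bool) : Int × Int × Bool :=
  match cs with
  | [] => (delta, lead, bc)
  | ch :: rest =>
    let nxt : Option Char := rest.head?
    if bc then
      if ch = '*' ∧ nxt = some '/' then altLoop rest.tail false ins esc delta lead dn
      else altLoop rest bc ins esc delta lead dn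
    else if ins = none ∧ ch = '/' ∧ nxt = some '/' then (delta, lead, bc)
    else if ins = none ∧ ch = '/' ∧ nxt = some '*' then altLoop rest.tail true ins esc delta lead dn
    else
      -- ch is emitted as code: update the counters in place
      let delta' := if ch = '{' then delta + 1 else if ch = '}' then delta - 1 else delta
      let p : Int × Bool :=
        if dn then (lead, dn)
        else if ch = '}' then (lead + 1, dn)
        else if pyWs ch ∧ lead = 0 then (lead, dn)
        else (lead, true)
      match ins with
      | some q => altLoop rest bc
          (if esc then some q else if ch = '\\' then some q else if ch = q then none else some q)
          (if esc then false else ch = '\\') delta' p.1 p.2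
      | none => altLoop rest bc (if ch = '\'' ∨ ch = '"' then some ch else none) esc delta' p.1 p.2
  termination_by cs.length
  decreasing_by all_goals (simp [List.length_tail]; try omega)

def line_brace_stats_alt (line : String) (in_block_comment : Bool) : Int × Int × Bool :=
  altLoop line.toList in_block_comment none false 0 0 false

-- ===== PRECONDITION & SPEC =====
def Spec_line_brace_stats (line : String) (in_block_comment : Bool) (out : Int × Int × Bool) : Prop := out = line_brace_stats_alt line in_block_comment
instance (line : String) (in_block_comment : Bool) (out : Int × Int × Bool) : Decidable (Spec_line_brace_stats line in_block_comment out) := by unfold Spec_line_brace_stats; infer_instance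

-- ===== CLAIM (what is proved, stated in full; the proofs are below) =====
def Claim_equal_line_brace_stats : Prop := ∀ (line : String) (in_block_comment : Bool), Dom_line_brace_stats line in_block_comment → Spec_line_brace_stats line in_block_comment (line_brace_stats line in_block_comment)

-- ===== LEMMAS AND PROOFS =====

-- brace delta of a code string
def cnt (code : List Char) : Int := (code.count '{' : Int) - (code.count '}' : Int)

-- the leading-close state machine of B, run over an emitted code string
def leadF : List Char → Int → Bool → Int × Bool
  | [], l, dn => (l, dn)
  | c :: cs, l, dn =>
    if dn then leadF cs l dn
    else if c = '}' then leadF cs (l + 1) dn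
    else if pyWs c ∧ l = 0 then leadF cs l dn
    else leadF cs l true

lemma cnt_cons (c : Char) (cs : List Char) :
    cnt (c :: cs) = (if c = '{' then cnt cs + 1 else if c = '}' then cnt cs - 1 else cnt cs) := by
  simp only [cnt, List.count_cons, beq_iff_eq]
  split_ifs with h1 h2 <;> simp_all <;> push_cast <;> omega

lemma leadF_done (cs : List Char) (l : Int) : (leadF cs l true).1 = l := by
  induction cs with
  | nil => simp [leadF]
  | cons c cs ih => simp [leadF, ih]

lemma leadF_pos (cs : List Char) (l : Int) (h : 0 < l) :
    (leadF cs l false).1 = l + ((cs.takeWhile (· == '}')).length : Int) := by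
  induction cs generalizing l with
  | nil => simp [leadF]
  | cons c cs ih =>
    by_cases hc : c = '}'
    · simp [leadF, hc, List.takeWhile_cons, ih (l + 1) (by omega)]
      omega
    · have hl : ¬ (pyWs c ∧ l = 0) := by rintro ⟨-, rfl⟩; omega
      simp [leadF, hc, hl, leadF_done, List.takeWhile_cons, beq_iff_eq]

lemma leadF_zero (cs : List Char) :
    (leadF cs 0 false).1 = (((cs.dropWhile pyWs).takeWhile (· == '}')).length : Int) := by
  induction cs with
  | nil => simp [leadF]
  | cons c cs ih =>
    by_cases hc : c = '}'
    · subst hc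
      simp [leadF, List.dropWhile_cons, (by decide : pyWs '}' = false), List.takeWhile_cons,
        leadF_pos cs 1 (by omega)]
      omega
    · by_cases hw : pyWs c
      · simp [leadF, hc, hw, List.dropWhile_cons, ih]
      · simp [leadF, hc, hw, leadF_done, List.dropWhile_cons, List.takeWhile_cons,
          beq_iff_eq]

-- main invariant: the single pass equals (strip, then count) with accumulators
lemma altLoop_eq (cs : List Char) (bc : Bool) (ins : Option Char) (esc : Bool)
    (d l : Int) (dn : Bool) :
    altLoop cs bc ins esc d l dn =
      (d + cnt (stripA cs bc ins esc).1,
       (leadF (stripA cs bc ins esc).1 l dn).1,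
       (stripA cs bc ins esc).2) := by
  induction cs, bc, ins, esc using stripA.induct generalizing d l dn with
  | case1 ins esc bc => simp [altLoop, stripA, cnt, leadF]
  | case2 a1 a2 a3 a4 a5 a6 a7 =>
    obtain ⟨rfl, h6⟩ := a6
    have h6' : a4.head? = some '/' := h6
    have hs : stripA ('*' :: a4) true a1 a2 = stripA a4.tail false a1 a2 := by
      conv_lhs => rw [stripA.eq_def]
      simp [h6']
    simp [altLoop, h6', a7, hs]
  | case3 a1 a2 a3 a4 a5 a6 a7 =>
    have h : ¬(a3 = '*' ∧ a4.head? = some '/') := a6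
    have hs : stripA (a3 :: a4) true a1 a2 = stripA a4 true a1 a2 := by
      conv_lhs => rw [stripA.eq_def]
      simp [h]
    simp [altLoop, h, a7, hs]
  | case4 a1 a2 a3 a4 a5 a6 a7 =>
    simp only [Bool.not_eq_true] at a5
    subst a5
    by_cases h1 : a2 = true <;> by_cases h2 : a3 = '\\' <;> by_cases h3 : a3 = a6 <;>
      simp_all [altLoop, stripA, cnt_cons, leadF] <;> split_ifs <;> simp_all <;> omega
  | case5 a1 a2 a3 a4 a5 a6 a7 =>
    simp only [Bool.not_eq_true] at a5
    subst a5
    have h1 : ¬(a3 = '/' ∧ a4.head? = some '/') := by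
      rintro ⟨rfl, -⟩; rcases a6 with h | h <;> simp at h
    have h2 : ¬(a3 = '/' ∧ a4.head? = some '*') := by
      rintro ⟨rfl, -⟩; rcases a6 with h | h <;> simp at h
    simp only [altLoop, stripA, Bool.false_eq_true, if_false, a6, if_true, h1, h2,
      and_false, false_and, and_true, true_and, cnt_cons]
    rw [a7]
    simp only [cnt_cons, leadF]
    split_ifs <;> simp_all <;> omega
  | case6 a1 a2 a3 a4 a5 a6 a7 a8 =>
    obtain ⟨rfl, h8⟩ := a8
    have h8' : a4.head? = some '/' := h8
    simp [altLoop, stripA, h8', a6, cnt, leadF]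
  | case7 a1 a2 a3 a4 a5 a6 a7 a8 a9 a10 =>
    obtain ⟨rfl, h9⟩ := a9
    have h9' : a4.head? = some '*' := h9
    simp [altLoop, stripA, h9', a6, a10]
  | case8 a1 a2 a3 a4 a5 a6 a7 a8 a9 a10 =>
    simp only [Bool.not_eq_true] at a6
    subst a6
    have h8 : ¬(a3 = '/' ∧ a4.head? = some '/') := a8
    have h9 : ¬(a3 = '/' ∧ a4.head? = some '*') := a9
    have hs : stripA (a3 :: a4) false none a2
        = (a3 :: (stripA a4 false none a2).1, (stripA a4 false none a2).2) := by
      conv_lhs => rw [stripA.eq_def]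
      simp [a7, h8, h9]
    conv_lhs => rw [altLoop.eq_def]
    simp only [hs]
    simp [h8, h9, a7, a10, cnt_cons, leadF]
    split_ifs <;> simp_all <;> omega

-- ===== VERDICT (by name: the statement is the Claim_ definition above) =====
theorem line_brace_stats_spec : Claim_equal_line_brace_stats := by
  intro line bc _
  show _ = _
  simp [line_brace_stats, line_brace_stats_alt, altLoop_eq, leadF_zero, cnt]
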